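-- pv_equiv track=rewrite | github.com/kevinj93/pcg_iso_0day_dox | modules/search.py | ordered_match
-- ===== SOURCE A (Python) =====
-- def ordered_match(search_name, tokens):
--     """
--     Enforces:
--     - Tokens must appear in order
--     - Alphabetic tokens must match whole words
--     - Numeric tokens allow substring
--     """
--
--     words = search_name.split()
--     index = 0
--
--     for token in tokens:
--         found = False
--
--         if token.isdigit():
--             # numeric token: allow substring match inside word
--             for i in range(index, len(words)):
--                 if token in words[i]:
--                     index = i + 1
--                     found = True
--                     break
--         else:
--             # alphabetic token: whole word match only
--             for i in range(index, len(words)):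
--                 if words[i] == token:
--                     index = i + 1
--                     found = True
--                     break
--
--         if not found:
--             return False
--
--     return True
-- ===== SOURCE B (Python) =====
-- def ordered_match(search_name, tokens):
--     t = 0
--     for word in search_name.split():
--         if t < len(tokens):
--             tok = tokens[t]
--             if (tok in word) if tok.isdigit() else (word == tok):
--                 t += 1
--     return t == len(tokens)
-- ===== Notes on version B (the rewrite author's own statement) =====
-- stated objective: simpler
-- what changed: Replaced the nested token-outer/word-inner scans with index bookkeeping and a found flag by a single forward pass over the words with a token cursor that advances on each match; the result is t == len(tokens).
import Mathlib
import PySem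

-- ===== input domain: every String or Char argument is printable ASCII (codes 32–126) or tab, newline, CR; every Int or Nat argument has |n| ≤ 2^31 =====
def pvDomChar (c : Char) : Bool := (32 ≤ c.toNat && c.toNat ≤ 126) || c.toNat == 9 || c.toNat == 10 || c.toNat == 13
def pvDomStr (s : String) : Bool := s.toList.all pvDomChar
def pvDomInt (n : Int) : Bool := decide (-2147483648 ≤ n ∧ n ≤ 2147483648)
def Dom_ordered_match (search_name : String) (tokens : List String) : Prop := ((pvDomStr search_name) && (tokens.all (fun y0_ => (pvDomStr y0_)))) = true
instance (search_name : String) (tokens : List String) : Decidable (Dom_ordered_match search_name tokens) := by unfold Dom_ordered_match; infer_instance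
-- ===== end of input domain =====

-- B replaces A's nested scans (per-token inner loop over words from a saved index) by one
-- forward pass over the words with a token cursor; objective: simpler.

-- ===== PORT A =====
-- inner 'for i in range(index, len(words)): if p(words[i]): index = i+1; found; break'
def pvFindFirst (p : String → Bool) (words : List String) (i : Nat) : Option Nat :=
  if h : i < words.length then
    if p words[i] then some (i + 1) else pvFindFirst p words (i + 1)
  else none
termination_by words.length - i

-- outer 'for token in tokens' loop carrying 'index'; returns False as soon as a token is not found
def pvGoA (words : List String) (tokens : List String) (index : Nat) : Bool :=
  match tokens with
  | [] => true
  | token :: rest =>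
    let res :=
      if PySem.Str.strIsdigit token then
        pvFindFirst (fun w => PySem.Str.isIn token w) words index
      else
        pvFindFirst (fun w => w == token) words index
    match res with
    | some j => pvGoA words rest j
    | none => false

def ordered_match (search_name : String) (tokens : List String) : Bool :=
  let words := PySem.Str.split₀ search_name
  pvGoA words tokens 0

-- ===== PORT B =====
-- single pass over words with token cursor t; tokens[t] read only when t < len(tokens)
def ordered_match_alt (search_name : String) (tokens : List String) : Bool :=
  let n := tokens.length
  let t := (PySem.Str.split₀ search_name).foldl
    (fun t word =>
      if t < n then
        let tok := tokens.getD t ""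
        if (if PySem.Str.strIsdigit tok then PySem.Str.isIn tok word else word == tok)
        then t + 1 else t
      else t) 0
  t == n

-- ===== PRECONDITION & SPEC =====
def Spec_ordered_match (search_name : String) (tokens : List String) (out : Bool) : Prop := out = ordered_match_alt search_name tokens
instance (search_name : String) (tokens : List String) (out : Bool) : Decidable (Spec_ordered_match search_name tokens out) := by unfold Spec_ordered_match; infer_instance

-- ===== CLAIM (what is proved, stated in full; the proofs are below) =====
def Claim_equal_ordered_match : Prop := ∀ (search_name : String) (tokens : List String), Dom_ordered_match search_name tokens → Spec_ordered_match search_name tokens (ordered_match search_name tokens)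

-- ===== LEMMAS AND PROOFS =====

-- the per-token matching rule both programs use
def pvStep (tok w : String) : Bool :=
  if PySem.Str.strIsdigit tok then PySem.Str.isIn tok w else w == tok

-- reference semantics: tokens left after one greedy pass over the words
def pvConsume : List String → List String → List String
  | [], _ => []
  | toks@(_ :: _), [] => toks
  | t :: ts, w :: ws => if pvStep t w then pvConsume ts ws else pvConsume (t :: ts) ws
termination_by toks ws => ws.length

lemma pvConsume_nil (ws : List String) : pvConsume [] ws = [] := by
  cases ws <;> simp [pvConsume]

lemma pvConsume_nil_right (ts : List String) : pvConsume ts [] = ts := by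
  cases ts <;> simp [pvConsume]

lemma pvConsume_cons_cons (t w : String) (ts ws : List String) :
    pvConsume (t :: ts) (w :: ws) =
      if pvStep t w then pvConsume ts ws else pvConsume (t :: ts) ws := by
  simp [pvConsume]

lemma pvConsume_length_le (ts ws : List String) : (pvConsume ts ws).length ≤ ts.length := by
  induction ws generalizing ts with
  | nil => rw [pvConsume_nil_right]
  | cons w ws ih =>
    cases ts with
    | nil => rw [pvConsume_nil]
    | cons t ts =>
      rw [pvConsume_cons_cons]
      split
      · exact le_trans (ih ts) (by simp)
      · exact ih (t :: ts)

lemma pvFindFirst_consume (tok : String) (words : List String) :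
    ∀ m i, words.length - i ≤ m → ∀ ts : List String,
      pvConsume (tok :: ts) (words.drop i) =
        (match pvFindFirst (fun w => pvStep tok w) words i with
         | some k => pvConsume ts (words.drop k)
         | none => tok :: ts) := by
  intro m
  induction m with
  | zero =>
    intro i hi ts
    have hlen : words.length ≤ i := by omega
    rw [List.drop_of_length_le hlen, pvFindFirst]
    rw [dif_neg (by omega), pvConsume_nil_right]
  | succ m ih =>
    intro i hi ts
    by_cases h : i < words.length
    · have hdrop : words.drop i = words[i] :: words.drop (i + 1) :=
        (List.getElem_cons_drop h).symm
      rw [hdrop, pvFindFirst, dif_pos h, pvConsume_cons_cons]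
      by_cases hp : pvStep tok words[i]
      · rw [if_pos hp, if_pos hp]
      · rw [if_neg hp, if_neg hp]
        exact ih (i + 1) (by omega) ts
    · have hlen : words.length ≤ i := by omega
      rw [List.drop_of_length_le hlen, pvFindFirst]
      rw [dif_neg h, pvConsume_nil_right]

lemma pvFindFirst_congr (p q : String → Bool) (hpq : ∀ w, p w = q w) (words : List String) :
    ∀ m i, words.length - i ≤ m → pvFindFirst p words i = pvFindFirst q words i := by
  intro m
  induction m with
  | zero =>
    intro i hi
    rw [pvFindFirst, dif_neg (by omega)]
    conv_rhs => rw [pvFindFirst, dif_neg (by omega)]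
  | succ m ih =>
    intro i hi
    by_cases h : i < words.length
    · rw [pvFindFirst, dif_pos h, hpq]
      conv_rhs => rw [pvFindFirst, dif_pos h]
      by_cases hq : q words[i]
      · rw [if_pos hq, if_pos hq]
      · rw [if_neg hq, if_neg hq]
        exact ih (i + 1) (by omega)
    · rw [pvFindFirst, dif_neg h]
      conv_rhs => rw [pvFindFirst, dif_neg h]

lemma pvGoA_eq_consume (words : List String) (tokens : List String) :
    ∀ i, pvGoA words tokens i = decide (pvConsume tokens (words.drop i) = []) := by
  induction tokens with
  | nil => intro i; simp [pvGoA, pvConsume_nil]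
  | cons tok rest ih =>
    intro i
    have hfind :
        (if PySem.Str.strIsdigit tok then
            pvFindFirst (fun w => PySem.Str.isIn tok w) words i
          else pvFindFirst (fun w => w == tok) words i)
        = pvFindFirst (fun w => pvStep tok w) words i := by
      by_cases hd : PySem.Str.strIsdigit tok
      · rw [if_pos hd]
        exact pvFindFirst_congr _ _
          (fun w => by simp only [pvStep]; rw [if_pos hd]) words (words.length - i) i le_rfl
      · rw [if_neg hd]
        exact pvFindFirst_congr _ _
          (fun w => by simp only [pvStep]; rw [if_neg hd]) words (words.length - i) i le_rfl
    have hc := pvFindFirst_consume tok words (words.length - i) i le_rfl rest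
    simp only [pvGoA, hfind]
    cases hk : pvFindFirst (fun w => pvStep tok w) words i with
    | none =>
      rw [hk] at hc
      simp only at hc
      simp [hc]
    | some k =>
      rw [hk] at hc
      simp only at hc
      rw [hc]
      exact ih k

lemma pvFoldB_eq (tokens : List String) (n : Nat) (hn : n = tokens.length) :
    ∀ (ws : List String) (t : Nat), t ≤ n →
      ws.foldl
        (fun t word =>
          if t < n then
            let tok := tokens.getD t ""
            if (if PySem.Str.strIsdigit tok then PySem.Str.isIn tok word else word == tok)
            then t + 1 else t
          else t) t
      = n - (pvConsume (tokens.drop t) ws).length := by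
  intro ws
  induction ws with
  | nil =>
    intro t ht
    rw [List.foldl_nil, pvConsume_nil_right]
    simp only [List.length_drop]
    omega
  | cons w ws ih =>
    intro t ht
    rw [List.foldl_cons]
    by_cases hlt : t < n
    · have hlt' : t < tokens.length := by omega
      have hdrop : tokens.drop t = tokens[t] :: tokens.drop (t + 1) :=
        (List.getElem_cons_drop hlt').symm
      have hgd : tokens.getD t "" = tokens[t] := List.getD_eq_getElem tokens "" hlt'
      have hstep : (if PySem.Str.strIsdigit (tokens.getD t "") then
            PySem.Str.isIn (tokens.getD t "") w else w == tokens.getD t "")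
          = pvStep tokens[t] w := by
        rw [hgd]; simp only [pvStep]
      by_cases hp : pvStep tokens[t] w
      · have hf : (if t < n then
              let tok := tokens.getD t ""
              if (if PySem.Str.strIsdigit tok then PySem.Str.isIn tok w else w == tok)
              then t + 1 else t
            else t) = t + 1 := by
          rw [if_pos hlt]
          show (if (if PySem.Str.strIsdigit (tokens.getD t "") then
              PySem.Str.isIn (tokens.getD t "") w else w == tokens.getD t "") = true
            then t + 1 else t) = t + 1
          rw [hstep, if_pos hp]
        rw [hf, ih (t + 1) (by omega), hdrop, pvConsume_cons_cons, if_pos hp]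
      · have hf : (if t < n then
              let tok := tokens.getD t ""
              if (if PySem.Str.strIsdigit tok then PySem.Str.isIn tok w else w == tok)
              then t + 1 else t
            else t) = t := by
          rw [if_pos hlt]
          show (if (if PySem.Str.strIsdigit (tokens.getD t "") then
              PySem.Str.isIn (tokens.getD t "") w else w == tokens.getD t "") = true
            then t + 1 else t) = t
          rw [hstep, if_neg hp]
        rw [hf, ih t ht, hdrop, pvConsume_cons_cons, if_neg hp]
    · have hdt : tokens.drop t = [] := List.drop_eq_nil_iff.mpr (by omega)
      rw [if_neg hlt, ih t ht, hdt, pvConsume_nil, pvConsume_nil]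

lemma pvFinal (xs : List String) (n : Nat) (h : xs.length ≤ n) :
    decide (xs = []) = (n - xs.length == n) := by
  cases xs with
  | nil => simp
  | cons a as =>
    simp only [List.length_cons] at h
    simp only [List.length_cons, decide_eq_false (List.cons_ne_nil a as)]
    have hne : n - (as.length + 1) ≠ n := by omega
    simp [hne]

-- ===== VERDICT (by name: the statement is the Claim_ definition above) =====
theorem ordered_match_spec : Claim_equal_ordered_match := by
  intro search_name tokens _
  unfold Spec_ordered_match ordered_match ordered_match_alt
  simp only []
  rw [pvFoldB_eq tokens tokens.length rfl (PySem.Str.split₀ search_name) 0 (Nat.zero_le _)]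
  rw [pvGoA_eq_consume (PySem.Str.split₀ search_name) tokens 0]
  simp only [List.drop_zero]
  exact pvFinal _ _ (pvConsume_length_le tokens (PySem.Str.split₀ search_name))
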